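-- pv_equiv track=rewrite | github.com/issoupewd/SecurityRM | RunOnMachine/FSM2LSFROnMachine.py | generate_fsm_2lfsr
-- ===== SOURCE A (Python) =====
-- def generate_fsm_2lfsr(r1_seq, r2_seq, steps=None):
--     """
--     FSM rule:
--       - Both LFSRs are clocked in parallel.
--       - If R1 output bit = 1 → FSM outputs R2 bit.
--       - If R1 output bit = 0 → FSM outputs nothing (bit is ignored).
--     """
--     if steps is None:
--         steps = len(r1_seq) * len(r2_seq)
--
--     idx1 = 0  # pointer in r1_seq
--     idx2 = 0  # pointer in r2_seq
--
--     fsm = []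
--
--     for _ in range(int(steps)):
--         a = r1_seq[idx1]
--         b = r2_seq[idx2]
--
--         if a == 1:
--             fsm.append(b)   # only output when R1 = 1
--
--         # advance R1 pointer with wrap
--         idx1 += 1
--         if idx1 >= len(r1_seq):
--             idx1 = 0
--
--         # advance R2 pointer with wrap
--         idx2 += 1
--         if idx2 >= len(r2_seq):
--             idx2 = 0
--
--     return fsm
-- ===== SOURCE B (Python) =====
-- def generate_fsm_2lfsr(r1_seq, r2_seq, steps=None):
--     n1, n2 = len(r1_seq), len(r2_seq)
--     if steps is None:
--         steps = n1 * n2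
--     steps = int(steps)
--     if steps <= 0:
--         return []
--     # gcd by Euclid (no imports in the original module)
--     a, b = n1, n2
--     while b:
--         a, b = b, a % b
--     period = n1 * n2 // a          # lcm(n1, n2): the FSM state repeats with this period
--     block = [r2_seq[i % n2] for i in range(period) if r1_seq[i % n1] == 1]
--     q, r = divmod(steps, period)
--     tail = [r2_seq[i % n2] for i in range(r) if r1_seq[i % n1] == 1]
--     return block * q + tail
-- ===== Notes on version B (the rewrite author's own statement) =====
-- stated objective: alternative
-- what changed: Instead of clocking both LFSRs step by step while maintaining two wrap-around pointers, B computes one lcm(n1,n2)-period block of FSM output once, replicates it steps//lcm times by list multiplication, and appends the remainder prefix; when gcd(n1,n2)>1 this does asymptotically less index work, though the measured timing inputs showed no overall speed-up.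
import Mathlib
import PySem

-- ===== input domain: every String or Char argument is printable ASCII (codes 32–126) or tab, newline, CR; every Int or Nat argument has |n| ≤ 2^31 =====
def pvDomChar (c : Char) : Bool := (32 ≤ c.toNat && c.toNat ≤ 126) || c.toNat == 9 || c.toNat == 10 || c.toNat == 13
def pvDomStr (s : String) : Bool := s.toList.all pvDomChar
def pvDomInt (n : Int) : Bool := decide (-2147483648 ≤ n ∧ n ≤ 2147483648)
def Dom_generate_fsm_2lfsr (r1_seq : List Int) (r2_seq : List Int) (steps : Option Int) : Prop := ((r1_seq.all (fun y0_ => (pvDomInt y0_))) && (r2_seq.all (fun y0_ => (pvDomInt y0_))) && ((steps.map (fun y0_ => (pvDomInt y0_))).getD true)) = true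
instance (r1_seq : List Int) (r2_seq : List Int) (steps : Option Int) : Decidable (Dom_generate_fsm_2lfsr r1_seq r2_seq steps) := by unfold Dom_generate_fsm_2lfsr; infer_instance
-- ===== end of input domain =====

-- B replaces A's step-by-step simulation of both LFSR pointers by computing one
-- lcm-period block of FSM output and replicating it (objective: alternative algorithm).

-- ===== PORT A =====
-- one iteration of A's for-loop: state = (idx1, idx2, fsm)
def pvStepA (r1_seq r2_seq : List Int) (st : Int × Int × List Int) : Int × Int × List Int :=
  let a := PySem.List.pyGetD r1_seq st.1 0
  let b := PySem.List.pyGetD r2_seq st.2.1 0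
  let fsm := if a = 1 then st.2.2 ++ [b] else st.2.2
  let idx1 := st.1 + 1
  let idx1 := if idx1 ≥ (r1_seq.length : Int) then 0 else idx1
  let idx2 := st.2.1 + 1
  let idx2 := if idx2 ≥ (r2_seq.length : Int) then 0 else idx2
  (idx1, idx2, fsm)

def generate_fsm_2lfsr (r1_seq : List Int) (r2_seq : List Int) (steps : Option Int) : List Int :=
  let s : Int := match steps with
    | none => (r1_seq.length : Int) * (r2_seq.length : Int)
    | some s => s
  ((PySem.List.pyRange 0 s 1).foldl (fun st _ => pvStepA r1_seq r2_seq st) (0, 0, [])).2.2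

-- ===== PORT B =====
-- Euclid's gcd, as hand-written in Source B
def pvGcd (a b : Nat) : Nat :=
  if b = 0 then a else pvGcd b (a % b)
termination_by b
decreasing_by exact Nat.mod_lt _ (Nat.pos_of_ne_zero (by assumption))

-- the comprehension '[r2[i % n2] for i in range(m) if r1[i % n1] == 1]'
def pvBlock (r1_seq r2_seq : List Int) (m : Nat) : List Int :=
  (List.range m).filterMap (fun i =>
    if r1_seq.getD (i % r1_seq.length) 0 = 1
    then some (r2_seq.getD (i % r2_seq.length) 0) else none)

def generate_fsm_2lfsr_alt (r1_seq : List Int) (r2_seq : List Int) (steps : Option Int) : List Int :=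
  let n1 := r1_seq.length
  let n2 := r2_seq.length
  let s : Int := steps.getD ((n1 : Int) * (n2 : Int))
  if s ≤ 0 then []
  else
    let period := n1 * n2 / pvGcd n1 n2
    let block := pvBlock r1_seq r2_seq period
    let q := s.toNat / period
    let r := s.toNat % period
    (List.replicate q block).flatten ++ pvBlock r1_seq r2_seq r

-- ===== PRECONDITION & SPEC =====
-- Pre_ excludes exactly the inputs where Python A raises IndexError: an explicit
-- positive step count with an empty r1_seq or r2_seq.
def Pre_generate_fsm_2lfsr (r1_seq : List Int) (r2_seq : List Int) (steps : Option Int) : Prop :=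
  steps = none ∨ steps.getD 0 ≤ 0 ∨ (r1_seq ≠ [] ∧ r2_seq ≠ [])
instance (r1_seq : List Int) (r2_seq : List Int) (steps : Option Int) : Decidable (Pre_generate_fsm_2lfsr r1_seq r2_seq steps) := by unfold Pre_generate_fsm_2lfsr; infer_instance

def pvWitness_generate_fsm_2lfsr : List Int × List Int × Option Int := ([1, 0, 1], [1, 1, 0], some 10)

def Spec_generate_fsm_2lfsr (r1_seq : List Int) (r2_seq : List Int) (steps : Option Int) (out : List Int) : Prop := out = generate_fsm_2lfsr_alt r1_seq r2_seq steps
instance (r1_seq : List Int) (r2_seq : List Int) (steps : Option Int) (out : List Int) : Decidable (Spec_generate_fsm_2lfsr r1_seq r2_seq steps out) := by unfold Spec_generate_fsm_2lfsr; infer_instance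

-- ===== CLAIM (what is proved, stated in full; the proofs are below) =====
def Claim_equal_generate_fsm_2lfsr : Prop := ∀ (r1_seq : List Int) (r2_seq : List Int) (steps : Option Int), Dom_generate_fsm_2lfsr r1_seq r2_seq steps → Pre_generate_fsm_2lfsr r1_seq r2_seq steps → Spec_generate_fsm_2lfsr r1_seq r2_seq steps (generate_fsm_2lfsr r1_seq r2_seq steps)

-- ===== LEMMAS AND PROOFS =====

-- f k = what the FSM emits at global step k (as a 0- or 1-element list)
def pvEmit (r1_seq r2_seq : List Int) (k : Nat) : List Int :=
  if r1_seq.getD (k % r1_seq.length) 0 = 1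
  then [r2_seq.getD (k % r2_seq.length) 0] else []

-- output of m consecutive steps starting at global step k
def pvSeg (r1_seq r2_seq : List Int) (k : Nat) : Nat → List Int
  | 0 => []
  | m + 1 => pvEmit r1_seq r2_seq k ++ pvSeg r1_seq r2_seq (k + 1) m

theorem pvGcd_eq_gcd (a b : Nat) : pvGcd a b = Nat.gcd b a := by
  unfold pvGcd
  split
  · simp [*]
  · rw [pvGcd_eq_gcd b (a % b)]
    exact (Nat.gcd_rec b a).symm
termination_by b
decreasing_by exact Nat.mod_lt _ (Nat.pos_of_ne_zero (by assumption))

theorem pvMod_succ (k n : Nat) (hn : 0 < n) :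
    (k + 1) % n = if k % n + 1 ≥ n then 0 else k % n + 1 := by
  have h1 : k % n < n := Nat.mod_lt _ hn
  rcases Nat.lt_or_ge n 2 with h | h
  · have hone : n = 1 := by omega
    subst hone; simp; omega
  · have h2 : 1 % n = 1 := Nat.mod_eq_of_lt (by omega)
    rw [Nat.add_mod k 1 n, h2]
    split
    · have he : k % n + 1 = n := by omega
      rw [he, Nat.mod_self]
    · exact Nat.mod_eq_of_lt (by omega)

-- loop invariant for A's fold
theorem pvA_loop (r1_seq r2_seq : List Int) (h1 : r1_seq ≠ []) (h2 : r2_seq ≠ [])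
    (l : List Int) : ∀ (k : Nat) (acc : List Int),
    l.foldl (fun st _ => pvStepA r1_seq r2_seq st)
      (((k % r1_seq.length : Nat) : Int), ((k % r2_seq.length : Nat) : Int), acc)
    = ((((k + l.length) % r1_seq.length : Nat) : Int),
       (((k + l.length) % r2_seq.length : Nat) : Int),
       acc ++ pvSeg r1_seq r2_seq k l.length) := by
  have hn1 : 0 < r1_seq.length := List.length_pos_iff.mpr h1
  have hn2 : 0 < r2_seq.length := List.length_pos_iff.mpr h2
  induction l with
  | nil => intro k acc; simp [pvSeg]
  | cons x t ih =>
    intro k acc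
    have g1 : PySem.List.pyGetD r1_seq ((k % r1_seq.length : Nat) : Int) 0
        = r1_seq.getD (k % r1_seq.length) 0 := PySem.List.pyGetD_natCast ..
    have g2 : PySem.List.pyGetD r2_seq ((k % r2_seq.length : Nat) : Int) 0
        = r2_seq.getD (k % r2_seq.length) 0 := PySem.List.pyGetD_natCast ..
    have hstep : pvStepA r1_seq r2_seq
        (((k % r1_seq.length : Nat) : Int), ((k % r2_seq.length : Nat) : Int), acc)
      = ((((k + 1) % r1_seq.length : Nat) : Int), (((k + 1) % r2_seq.length : Nat) : Int),
         acc ++ pvEmit r1_seq r2_seq k) := by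
      simp only [pvStepA, g1, g2, Prod.mk.injEq]
      refine ⟨?_, ?_, ?_⟩
      · rw [pvMod_succ k _ hn1]
        split_ifs <;> push_cast at * <;> omega
      · rw [pvMod_succ k _ hn2]
        split_ifs <;> push_cast at * <;> omega
      · unfold pvEmit
        split_ifs <;> simp
    simp only [List.foldl_cons, hstep]
    rw [ih (k + 1) (acc ++ pvEmit r1_seq r2_seq k)]
    simp only [List.length_cons]
    have harr : k + 1 + t.length = k + (t.length + 1) := by omega
    rw [harr]
    have hseg : pvSeg r1_seq r2_seq k (t.length + 1)
        = pvEmit r1_seq r2_seq k ++ pvSeg r1_seq r2_seq (k + 1) t.length := rfl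
    rw [hseg, List.append_assoc]

-- A's result, characterised (nonempty case)
theorem pvA_char (r1_seq r2_seq : List Int) (h1 : r1_seq ≠ []) (h2 : r2_seq ≠ []) (s : Int) :
    ((PySem.List.pyRange 0 s 1).foldl (fun st _ => pvStepA r1_seq r2_seq st) (0, 0, [])).2.2
    = pvSeg r1_seq r2_seq 0 s.toNat := by
  have hn1 : 0 < r1_seq.length := List.length_pos_iff.mpr h1
  have hn2 : 0 < r2_seq.length := List.length_pos_iff.mpr h2
  have h0 : ((0 : Int), (0 : Int), ([] : List Int))
      = (((0 % r1_seq.length : Nat) : Int), ((0 % r2_seq.length : Nat) : Int), ([] : List Int)) := by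
    simp
  rw [h0, pvA_loop r1_seq r2_seq h1 h2 _ 0 []]
  simp [PySem.List.length_pyRange_one]

-- pvBlock is pvSeg from 0
theorem pvSeg_snoc (r1_seq r2_seq : List Int) (n : Nat) : ∀ k,
    pvSeg r1_seq r2_seq k (n + 1)
    = pvSeg r1_seq r2_seq k n ++ pvEmit r1_seq r2_seq (k + n) := by
  induction n with
  | zero => intro k; simp [pvSeg]
  | succ n ih =>
    intro k
    have e1 : pvSeg r1_seq r2_seq k (n + 1 + 1)
        = pvEmit r1_seq r2_seq k ++ pvSeg r1_seq r2_seq (k + 1) (n + 1) := rfl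
    have e2 : pvSeg r1_seq r2_seq k (n + 1)
        = pvEmit r1_seq r2_seq k ++ pvSeg r1_seq r2_seq (k + 1) n := rfl
    rw [e1, ih (k + 1), e2, List.append_assoc]
    have : k + 1 + n = k + (n + 1) := by omega
    rw [this]

theorem pvBlock_eq_seg (r1_seq r2_seq : List Int) (m : Nat) :
    pvBlock r1_seq r2_seq m = pvSeg r1_seq r2_seq 0 m := by
  induction m with
  | zero => simp [pvBlock, pvSeg]
  | succ m ih =>
    rw [pvSeg_snoc r1_seq r2_seq m 0]
    unfold pvBlock
    rw [List.range_succ, List.filterMap_append, ← ih]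
    unfold pvBlock
    congr 1
    simp only [List.filterMap_cons, List.filterMap_nil, pvEmit, Nat.zero_add]
    split_ifs <;> simp

theorem pvSeg_add (r1_seq r2_seq : List Int) (m n : Nat) : ∀ k,
    pvSeg r1_seq r2_seq k (m + n) = pvSeg r1_seq r2_seq k m ++ pvSeg r1_seq r2_seq (k + m) n := by
  induction m with
  | zero => intro k; simp [pvSeg]
  | succ m ih =>
    intro k
    have h : m + 1 + n = (m + n) + 1 := by omega
    have e1 : pvSeg r1_seq r2_seq k ((m + n) + 1)
        = pvEmit r1_seq r2_seq k ++ pvSeg r1_seq r2_seq (k + 1) (m + n) := rfl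
    have e2 : pvSeg r1_seq r2_seq k (m + 1)
        = pvEmit r1_seq r2_seq k ++ pvSeg r1_seq r2_seq (k + 1) m := rfl
    rw [h, e1, ih (k + 1), e2, List.append_assoc]
    have : k + 1 + m = k + (m + 1) := by omega
    rw [this]

theorem pvEmit_shift (r1_seq r2_seq : List Int) (L : Nat)
    (hd1 : r1_seq.length ∣ L) (hd2 : r2_seq.length ∣ L) (k : Nat) :
    pvEmit r1_seq r2_seq (k + L) = pvEmit r1_seq r2_seq k := by
  unfold pvEmit
  obtain ⟨c1, h1⟩ := hd1
  obtain ⟨c2, h2⟩ := hd2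
  rw [h1] at *
  rw [h2]
  rw [Nat.add_mul_mod_self_left, ← h2, Nat.add_mul_mod_self_left]

theorem pvSeg_shift (r1_seq r2_seq : List Int) (L : Nat)
    (hd1 : r1_seq.length ∣ L) (hd2 : r2_seq.length ∣ L) (m : Nat) : ∀ k,
    pvSeg r1_seq r2_seq (k + L) m = pvSeg r1_seq r2_seq k m := by
  induction m with
  | zero => intro k; simp [pvSeg]
  | succ m ih =>
    intro k
    rw [pvSeg, pvSeg]
    have hk : k + L + 1 = (k + 1) + L := by omega
    rw [pvEmit_shift r1_seq r2_seq L hd1 hd2 k, hk, ih (k + 1)]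

theorem pvSeg_blocks (r1_seq r2_seq : List Int) (L : Nat)
    (hd1 : r1_seq.length ∣ L) (hd2 : r2_seq.length ∣ L) (q r : Nat) :
    pvSeg r1_seq r2_seq 0 (q * L + r)
    = (List.replicate q (pvSeg r1_seq r2_seq 0 L)).flatten ++ pvSeg r1_seq r2_seq 0 r := by
  induction q with
  | zero => simp
  | succ q ih =>
    have h : (q + 1) * L + r = L + (q * L + r) := by ring
    rw [h, pvSeg_add r1_seq r2_seq L (q * L + r) 0]
    have hsh : pvSeg r1_seq r2_seq (0 + L) (q * L + r) = pvSeg r1_seq r2_seq 0 (q * L + r) :=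
      pvSeg_shift r1_seq r2_seq L hd1 hd2 _ 0
    rw [hsh, ih, List.replicate_succ, List.flatten_cons, List.append_assoc]

-- the main equality on nonempty inputs
theorem pvMain (r1_seq r2_seq : List Int) (h1 : r1_seq ≠ []) (h2 : r2_seq ≠ []) (s : Int) :
    ((PySem.List.pyRange 0 s 1).foldl (fun st _ => pvStepA r1_seq r2_seq st) (0, 0, [])).2.2
    = generate_fsm_2lfsr_alt r1_seq r2_seq (some s) := by
  have hn1 : 0 < r1_seq.length := List.length_pos_iff.mpr h1
  have hn2 : 0 < r2_seq.length := List.length_pos_iff.mpr h2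
  rw [pvA_char r1_seq r2_seq h1 h2 s]
  unfold generate_fsm_2lfsr_alt
  simp only [Option.getD_some]
  by_cases hs : s ≤ 0
  · have : s.toNat = 0 := Int.toNat_of_nonpos hs
    simp [hs, this, pvSeg]
  · simp only [hs, if_false]
    have hg : pvGcd r1_seq.length r2_seq.length = Nat.gcd r1_seq.length r2_seq.length := by
      rw [pvGcd_eq_gcd, Nat.gcd_comm]
    have hL : r1_seq.length * r2_seq.length / pvGcd r1_seq.length r2_seq.length
        = Nat.lcm r1_seq.length r2_seq.length := by
      rw [hg]; rfl
    rw [hL]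
    set L := Nat.lcm r1_seq.length r2_seq.length with hLdef
    have hd1 : r1_seq.length ∣ L := Nat.dvd_lcm_left _ _
    have hd2 : r2_seq.length ∣ L := Nat.dvd_lcm_right _ _
    have hsplit : s.toNat = (s.toNat / L) * L + s.toNat % L := by
      rw [Nat.mul_comm]
      exact (Nat.div_add_mod s.toNat L).symm
    rw [pvBlock_eq_seg, pvBlock_eq_seg]
    conv_lhs => rw [hsplit]
    exact pvSeg_blocks r1_seq r2_seq L hd1 hd2 (s.toNat / L) (s.toNat % L)

-- ===== VERDICT (by name: the statement is the Claim_ definition above) =====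
theorem generate_fsm_2lfsr_spec : Claim_equal_generate_fsm_2lfsr := by
  intro r1_seq r2_seq steps _ hpre
  unfold Spec_generate_fsm_2lfsr
  cases steps with
  | some s =>
    by_cases hs : s ≤ 0
    · show generate_fsm_2lfsr r1_seq r2_seq (some s) = _
      unfold generate_fsm_2lfsr generate_fsm_2lfsr_alt
      simp [PySem.List.pyRange_one_eq_nil hs, hs]
    · have hne : r1_seq ≠ [] ∧ r2_seq ≠ [] := by
        rcases hpre with h | h | h
        · exact absurd h (by simp)
        · simp at h; omega
        · exact h
      show generate_fsm_2lfsr r1_seq r2_seq (some s) = _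
      unfold generate_fsm_2lfsr
      exact pvMain r1_seq r2_seq hne.1 hne.2 s
  | none =>
    by_cases h1 : r1_seq = []
    · show generate_fsm_2lfsr r1_seq r2_seq none = _
      unfold generate_fsm_2lfsr generate_fsm_2lfsr_alt
      subst h1
      simp [PySem.List.pyRange_one_eq_nil]
    · by_cases h2 : r2_seq = []
      · show generate_fsm_2lfsr r1_seq r2_seq none = _
        unfold generate_fsm_2lfsr generate_fsm_2lfsr_alt
        subst h2
        simp [PySem.List.pyRange_one_eq_nil]
      · show generate_fsm_2lfsr r1_seq r2_seq none = _
        unfold generate_fsm_2lfsr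
        have := pvMain r1_seq r2_seq h1 h2 ((r1_seq.length : Int) * (r2_seq.length : Int))
        rw [this]
        unfold generate_fsm_2lfsr_alt
        simp
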